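-- pv_equiv track=rewrite | github.com/GraysenT/hedge-fund-ai | truthgrid/belief_friction_analyzer.py | analyze_belief_conflict
-- ===== SOURCE A (Python) =====
-- def analyze_belief_conflict(strategies):
--     """
--     Finds friction between coexisting strategies that hold contradictory truths.
--     """
--     conflicts = []
--     for s1 in strategies:
--         for s2 in strategies:
--             if s1["id"] != s2["id"] and s1.get("belief") != s2.get("belief"):
--                 if s1.get("signal") == s2.get("signal") and s1.get("signal") is not None:
--                     conflicts.append((s1["id"], s2["id"]))
--     return conflicts
-- ===== SOURCE B (Python) =====
-- def analyze_belief_conflict(strategies):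
--     """
--     Finds friction between coexisting strategies that hold contradictory truths.
--     B: one pass groups strategies by (non-None) signal; each strategy then emits
--     its conflicts from its own signal group only, instead of scanning all pairs.
--     """
--     groups = {}
--     for s in strategies:
--         sig = s.get("signal")
--         if sig is not None:
--             groups.setdefault(sig, []).append(s)
--     conflicts = []
--     for s1 in strategies:
--         sig = s1.get("signal")
--         if sig is None:
--             continue
--         i1 = s1["id"]
--         b1 = s1.get("belief")
--         conflicts.extend((i1, s2["id"])
--                          for s2 in groups[sig]
--                          if i1 != s2["id"] and b1 != s2.get("belief"))
--     return conflicts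
-- ===== Notes on version B (the rewrite author's own statement) =====
-- stated objective: faster
-- what changed: Replaces the all-pairs nested scan with a one-pass dict grouping strategies by signal, so each strategy emits conflicts only from its own signal group via a filtered comprehension.
import Mathlib
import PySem

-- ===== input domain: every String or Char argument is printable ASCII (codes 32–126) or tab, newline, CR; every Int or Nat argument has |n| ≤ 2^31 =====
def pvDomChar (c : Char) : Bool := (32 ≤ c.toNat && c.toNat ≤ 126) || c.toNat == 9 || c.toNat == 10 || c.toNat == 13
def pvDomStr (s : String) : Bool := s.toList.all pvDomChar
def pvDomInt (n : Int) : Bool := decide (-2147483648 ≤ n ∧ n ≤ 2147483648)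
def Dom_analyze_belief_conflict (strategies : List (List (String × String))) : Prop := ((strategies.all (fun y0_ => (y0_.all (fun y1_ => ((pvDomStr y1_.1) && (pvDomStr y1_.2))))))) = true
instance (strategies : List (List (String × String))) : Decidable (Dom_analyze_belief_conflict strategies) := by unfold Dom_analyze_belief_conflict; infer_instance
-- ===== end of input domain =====

-- B groups the strategies by signal in one pass and compares each strategy only with its
-- own signal group, instead of A's all-pairs scan; return values agree exactly on Pre_.

-- ===== PORT A =====
-- s.get(k): first match in the association list (Python dict lookup)
def dget (s : List (String × String)) (k : String) : Option String :=
  (s.find? (fun p => p.1 == k)).map (·.2)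

-- literal port of A's nested loops; s["id"] is (dget s "id").getD "" — Pre_ excludes the
-- inputs where the lookup is none (Python raises KeyError there)
def analyze_belief_conflict (strategies : List (List (String × String))) : List (String × String) :=
  strategies.foldl (fun conflicts s1 =>
    strategies.foldl (fun conflicts s2 =>
      if ((dget s1 "id").getD "" != (dget s2 "id").getD "") && (dget s1 "belief" != dget s2 "belief") then
        if (dget s1 "signal" == dget s2 "signal") && (dget s1 "signal").isSome then
          conflicts ++ [((dget s1 "id").getD "", (dget s2 "id").getD "")]
        else conflicts
      else conflicts) conflicts) []

-- ===== PORT B =====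
-- groups.setdefault(sig, []).append(s)  ≡  modify sig [] (· ++ [s])
def pvGroups (strategies : List (List (String × String))) :
    PySem.Dict String (List (List (String × String))) :=
  strategies.foldl (fun d s =>
    match dget s "signal" with
    | none => d
    | some sig => d.modify sig [] (· ++ [s])) PySem.Dict.empty

def analyze_belief_conflict_alt (strategies : List (List (String × String))) : List (String × String) :=
  let groups := pvGroups strategies
  strategies.foldl (fun conflicts s1 =>
    match dget s1 "signal" with
    | none => conflicts
    | some sig =>
      let i1 := (dget s1 "id").getD ""
      let b1 := dget s1 "belief"
      conflicts ++ ((groups.getD sig []).filter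
          (fun s2 => (i1 != (dget s2 "id").getD "") && (b1 != dget s2 "belief"))).map
        (fun s2 => (i1, (dget s2 "id").getD ""))) []

-- ===== PRECONDITION & SPEC =====
-- Pre_ excludes exactly the inputs on which Python A raises KeyError: a strategy without an "id" key.
def Pre_analyze_belief_conflict (strategies : List (List (String × String))) : Prop :=
  (strategies.all (fun s => (dget s "id").isSome)) = true
instance (strategies : List (List (String × String))) : Decidable (Pre_analyze_belief_conflict strategies) := by
  unfold Pre_analyze_belief_conflict; infer_instance

def pvWitness_analyze_belief_conflict : (List (List (String × String))) :=
  [[("id","a"),("signal","x"),("belief","p")], [("id","b"),("signal","x"),("belief","q")]]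

def Spec_analyze_belief_conflict (strategies : List (List (String × String))) (out : List (String × String)) : Prop := out = analyze_belief_conflict_alt strategies
instance (strategies : List (List (String × String))) (out : List (String × String)) : Decidable (Spec_analyze_belief_conflict strategies out) := by unfold Spec_analyze_belief_conflict; infer_instance

-- ===== CLAIM (what is proved, stated in full; the proofs are below) =====
def Claim_equal_analyze_belief_conflict : Prop := ∀ (strategies : List (List (String × String))), Dom_analyze_belief_conflict strategies → Pre_analyze_belief_conflict strategies → Spec_analyze_belief_conflict strategies (analyze_belief_conflict strategies)

-- ===== LEMMAS AND PROOFS =====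

-- the groups dict holds, under each signal, exactly the strategies carrying that signal, in order
lemma getD_pvGroups_fold (l : List (List (String × String)))
    (d : PySem.Dict String (List (List (String × String)))) (sig : String) :
    (l.foldl (fun d s =>
      match dget s "signal" with
      | none => d
      | some sg => d.modify sg [] (· ++ [s])) d).getD sig []
    = d.getD sig [] ++ l.filter (fun s => dget s "signal" == some sig) := by
  induction l generalizing d with
  | nil => simp
  | cons s l ih =>
    simp only [List.foldl_cons, List.filter_cons]
    cases h : dget s "signal" with
    | none => simp [ih]
    | some sg =>
      rw [ih]
      by_cases hsg : sig = sg
      · subst hsg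
        simp [PySem.Dict.getD_modify_self]
      · simp [PySem.Dict.getD_modify, hsg, Ne.symm hsg]

lemma getD_pvGroups (strategies : List (List (String × String))) (sig : String) :
    (pvGroups strategies).getD sig []
    = strategies.filter (fun s => dget s "signal" == some sig) := by
  simpa using getD_pvGroups_fold strategies PySem.Dict.empty sig

-- A's inner loop over one s1 equals B's loop over s1's signal group
lemma inner_eq (strategies : List (List (String × String)))
    (s1 : List (String × String)) (acc : List (String × String)) :
    strategies.foldl (fun conflicts s2 =>
      if ((dget s1 "id").getD "" != (dget s2 "id").getD "") && (dget s1 "belief" != dget s2 "belief") then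
        if (dget s1 "signal" == dget s2 "signal") && (dget s1 "signal").isSome then
          conflicts ++ [((dget s1 "id").getD "", (dget s2 "id").getD "")]
        else conflicts
      else conflicts) acc
    = (match dget s1 "signal" with
       | none => acc
       | some sig =>
         acc ++ (((pvGroups strategies).getD sig []).filter
             (fun s2 => ((dget s1 "id").getD "" != (dget s2 "id").getD "") && (dget s1 "belief" != dget s2 "belief"))).map
           (fun s2 => ((dget s1 "id").getD "", (dget s2 "id").getD ""))) := by
  cases h : dget s1 "signal" with
  | none =>
    rw [PySem.List.foldl_congr_mem strategies _ (fun acc _ => acc) acc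
      (by intro a x _; simp)]
    simp
  | some sig =>
    rw [PySem.List.foldl_congr_mem strategies _
      (fun conflicts s2 =>
        if (((dget s1 "id").getD "" != (dget s2 "id").getD "") && (dget s1 "belief" != dget s2 "belief")) &&
           (dget s2 "signal" == some sig) then
          conflicts ++ [((dget s1 "id").getD "", (dget s2 "id").getD "")]
        else conflicts) acc
      (by
        intro a s2 _
        by_cases h1 : dget s2 "signal" = some sig
        · simp [h1, Bool.and_comm]
        · simp [h1]
          intro _ _ e
          exact h1 e.symm)]
    simp only [PySem.List.foldl_append_if, getD_pvGroups, List.filter_filter]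

-- ===== VERDICT (by name: the statement is the Claim_ definition above) =====
theorem analyze_belief_conflict_spec : Claim_equal_analyze_belief_conflict := by
  intro strategies _ _
  unfold Spec_analyze_belief_conflict analyze_belief_conflict analyze_belief_conflict_alt
  exact PySem.List.foldl_congr_mem strategies _ _ []
    (fun acc s1 _ => inner_eq strategies s1 acc)
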